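-- pv_equiv track=rewrite | github.com/jmpmonge/TFM | controllers/pioneer_TFM/experimentos/datos_comparados.py | aplanar_rutas
-- ===== SOURCE A (Python) =====
-- def aplanar_rutas(rutas):
--     """Une los tramos de una misión en un único camino, sin duplicar uniones."""
--     camino = []
--     for i, ruta in enumerate(rutas):
--         if not ruta:
--             return []  # un tramo sin solución invalida la misión completa
--         if i == 0:
--             camino.extend(ruta)
--         else:
--             camino.extend(ruta[1:])
--     return camino
-- ===== SOURCE B (Python) =====
-- def aplanar_rutas(rutas):
--     """Une los tramos de una mision en un unico camino, sin duplicar uniones.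
--
--     Recursivo: aplana primero el resto de la mision y elimina la union
--     duplicada al concatenar (el primer punto del sufijo ya aplanado)."""
--     if not rutas:
--         return []
--     head = rutas[0]
--     if not head:
--         return []
--     rest = rutas[1:]
--     if not rest:
--         return list(head)
--     tail = aplanar_rutas(rest)
--     if not tail:
--         return []  # algun tramo posterior sin solucion
--     return head + tail[1:]
-- ===== Notes on version B (the rewrite author's own statement) =====
-- stated objective: alternative
-- what changed: Replaces A's indexed accumulator loop (trimming each segment's head before appending) with a structural recursion that flattens the suffix first and removes the duplicated joint at join time by dropping the first element of the already-flattened suffix.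
import Mathlib
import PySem

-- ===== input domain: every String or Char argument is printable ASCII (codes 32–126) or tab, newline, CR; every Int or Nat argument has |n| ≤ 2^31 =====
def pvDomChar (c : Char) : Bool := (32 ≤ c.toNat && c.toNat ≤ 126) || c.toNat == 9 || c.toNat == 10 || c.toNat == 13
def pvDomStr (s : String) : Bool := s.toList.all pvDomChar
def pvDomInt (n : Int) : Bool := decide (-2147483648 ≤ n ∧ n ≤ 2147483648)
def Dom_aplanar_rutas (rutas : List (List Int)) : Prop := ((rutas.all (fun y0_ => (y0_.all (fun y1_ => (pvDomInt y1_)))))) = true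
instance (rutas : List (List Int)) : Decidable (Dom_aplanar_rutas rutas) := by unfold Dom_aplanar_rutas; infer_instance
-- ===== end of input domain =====

-- B replaces A's indexed accumulator loop by a structural recursion that flattens
-- the suffix first and drops the duplicated joint of the flattened suffix (objective: alternative).

-- ===== PORT A =====
-- loop over (i, ruta) with accumulator camino; 'return []' on an empty segment;
-- ruta[1:] on a list is exactly List.drop 1
def aplanarA_go (rutas : List (List Int)) (i : Nat) (camino : List Int) : List Int :=
  match rutas with
  | [] => camino
  | ruta :: rest =>
    if ruta.isEmpty then []
    else if i = 0 then aplanarA_go rest (i + 1) (camino ++ ruta)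
    else aplanarA_go rest (i + 1) (camino ++ ruta.drop 1)

def aplanar_rutas (rutas : List (List Int)) : List Int :=
  aplanarA_go rutas 0 []

-- ===== PORT B =====
-- recursion of Source B: empty mission → []; empty head → []; single segment → head;
-- else flatten the rest recursively, [] if that failed, else head ++ tail[1:]
def aplanar_rutas_alt (rutas : List (List Int)) : List Int :=
  match rutas with
  | [] => []
  | head :: rest =>
    if head.isEmpty then []
    else match rest with
      | [] => head
      | _ :: _ =>
        let tail := aplanar_rutas_alt rest
        if tail.isEmpty then [] else head ++ tail.drop 1

-- ===== PRECONDITION & SPEC =====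
def Spec_aplanar_rutas (rutas : List (List Int)) (out : List Int) : Prop := out = aplanar_rutas_alt rutas
instance (rutas : List (List Int)) (out : List Int) : Decidable (Spec_aplanar_rutas rutas out) := by unfold Spec_aplanar_rutas; infer_instance

-- ===== CLAIM (what is proved, stated in full; the proofs are below) =====
def Claim_equal_aplanar_rutas : Prop := ∀ (rutas : List (List Int)), Dom_aplanar_rutas rutas → Spec_aplanar_rutas rutas (aplanar_rutas rutas)

-- ===== LEMMAS AND PROOFS =====
lemma aplanarA_go_tail (rest : List (List Int)) (i : Nat) (camino : List Int)
    (hi : i ≠ 0) :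
    aplanarA_go rest i camino =
      if rest.any (fun r => r.isEmpty) then []
      else camino ++ rest.flatMap (fun r => r.drop 1) := by
  induction rest generalizing i camino with
  | nil => simp [aplanarA_go]
  | cons r rs ih =>
    simp only [aplanarA_go, List.any_cons, List.flatMap_cons]
    by_cases hr : r.isEmpty
    · simp [hr]
    · rw [if_neg (by simp [hr]), if_neg hi, ih (i + 1) _ (by omega)]
      by_cases h : rs.any (fun r => r.isEmpty)
      · simp [hr, h]
      · simp [hr, h]

-- B's recursion step at a mission of ≥ 2 segments, as written in Source B
lemma alt_cons (r s : List Int) (ss : List (List Int)) :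
    aplanar_rutas_alt (r :: s :: ss) =
      if r.isEmpty then []
      else if (aplanar_rutas_alt (s :: ss)).isEmpty then []
      else r ++ (aplanar_rutas_alt (s :: ss)).drop 1 := rfl

-- closed form of B: same "any empty → []" shape as A's loop
lemma alt_closed (r : List Int) (rs : List (List Int)) :
    aplanar_rutas_alt (r :: rs) =
      if (r :: rs).any (fun x => x.isEmpty) then []
      else r ++ rs.flatMap (fun x => x.drop 1) := by
  induction rs generalizing r with
  | nil =>
    by_cases hr : r.isEmpty
    · simp [aplanar_rutas_alt, hr]
    · simp [aplanar_rutas_alt, hr]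
  | cons s ss ih =>
    rw [alt_cons, ih s]
    by_cases hr : r.isEmpty
    · simp [hr]
    · rw [if_neg (by simp [hr])]
      by_cases h : (s :: ss).any (fun x => x.isEmpty)
      · rw [if_pos h, if_pos (by rfl),
          if_pos (by simp only [List.any_cons] at h ⊢; simp_all)]
      · rw [if_neg h]
        have hs : ¬ s.isEmpty := by
          intro hc; exact absurd (by simp [List.any_cons, hc]) h
        have htail : ¬ (s ++ ss.flatMap (fun x => x.drop 1)).isEmpty = true := by
          cases s with
          | nil => simp at hs
          | cons a as => simp
        rw [if_neg htail,
          if_neg (by simp only [List.any_cons] at h ⊢; simp_all)]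
        cases s with
        | nil => simp at hs
        | cons a as => simp [List.flatMap_cons]

-- ===== VERDICT (by name: the statement is the Claim_ definition above) =====
theorem aplanar_rutas_spec : Claim_equal_aplanar_rutas := by
  intro rutas _
  unfold Spec_aplanar_rutas aplanar_rutas
  cases rutas with
  | nil => simp [aplanarA_go, aplanar_rutas_alt]
  | cons r rs =>
    rw [alt_closed]
    simp only [aplanarA_go, List.any_cons]
    by_cases hr : r.isEmpty
    · simp [hr]
    · rw [if_neg (by simp [hr]), if_pos trivial,
        aplanarA_go_tail rs (0 + 1) ([] ++ r) (by omega)]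
      simp [hr]
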